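-- pv_equiv track=rewrite | github.com/Palta06/Reporte2 | grafico.py | card_game
-- ===== SOURCE A (Python) =====
-- def card_game(n, distribucion):
--     cartas_A = [i+1 for i, c in enumerate(distribucion) if c == 'A']
--     cartas_B = [i+1 for i, c in enumerate(distribucion) if c == 'B']
--
--     while cartas_A and cartas_B:
--         # Alice juega su carta más alta
--         carta_A = max(cartas_A)
--         # Bob responde con la carta más baja que pueda ganar
--         posibles = [c for c in cartas_B if (c > carta_A) or (c == 1 and carta_A == n)]
--         if posibles:
--             carta_B = min(posibles)
--             ganador = 'B'
--         else:
--             carta_B = min(cartas_B)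
--             ganador = 'A'
--
--         cartas_A.remove(carta_A)
--         cartas_B.remove(carta_B)
--
--         if ganador == 'A':
--             cartas_A.extend([carta_A, carta_B])
--         else:
--             cartas_B.extend([carta_A, carta_B])
--
--     return "Alice" if cartas_A else "Bob"
-- ===== SOURCE B (Python) =====
-- def card_game(n, distribucion):
--     # One pass: the whole game is decided by the first round, because the
--     # round-1 winner keeps a dominating card forever.
--     maxA = maxB = None
--     bob_has_one = False
--     for i, c in enumerate(distribucion):
--         card = i + 1
--         if c == 'A':
--             maxA = card
--         elif c == 'B':
--             maxB = card
--             if card == 1: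
--                 bob_has_one = True
--     if maxA is None:
--         return "Bob"
--     if maxB is None:
--         return "Alice"
--     return "Bob" if (maxB > maxA or (bob_has_one and maxA == n)) else "Alice"
-- ===== Notes on version B (the rewrite author's own statement) =====
-- stated objective: faster
-- what changed: Replaced the whole round-by-round game simulation with a single pass computing Alice's and Bob's highest cards and whether Bob holds card 1: the first round's winner provably keeps winning, so the winner is max(B)>max(A) or (1 in B and max(A)==n).
import Mathlib
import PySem

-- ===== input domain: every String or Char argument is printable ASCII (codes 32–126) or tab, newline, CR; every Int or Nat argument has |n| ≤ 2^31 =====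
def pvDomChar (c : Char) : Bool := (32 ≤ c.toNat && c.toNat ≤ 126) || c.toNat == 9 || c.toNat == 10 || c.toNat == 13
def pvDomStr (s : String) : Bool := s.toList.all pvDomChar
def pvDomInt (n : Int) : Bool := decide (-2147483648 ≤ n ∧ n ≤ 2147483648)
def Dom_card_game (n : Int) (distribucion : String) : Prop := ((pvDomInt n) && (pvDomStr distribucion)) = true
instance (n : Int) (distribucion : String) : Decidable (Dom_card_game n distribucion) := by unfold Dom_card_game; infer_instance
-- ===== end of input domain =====

-- B replaces A's round-by-round simulation by a single pass (the first round's winner provably keeps winning): asymptotically faster.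

-- ===== PORT A =====
-- [i+1 for i, c in enumerate(distribucion) if c == 'A']
def cgA (distribucion : String) : List Int :=
  ((PySem.List.enumerate distribucion.toList 0).filter (fun p => p.2 == 'A')).map (fun p => p.1 + 1)

def cgB (distribucion : String) : List Int :=
  ((PySem.List.enumerate distribucion.toList 0).filter (fun p => p.2 == 'B')).map (fun p => p.1 + 1)

-- the while-loop, with fuel (the Python loop terminates; |A|+|B| rounds always suffice, proved below);
-- the .getD defaults are never reached on the guarded branches (max/min of nonempty lists, remove of a present element)
def cgLoop (n : Int) : Nat → List Int → List Int → String
  | 0, cartasA, _ => if cartasA.isEmpty then "Bob" else "Alice"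
  | fuel+1, cartasA, cartasB =>
    if cartasA.isEmpty || cartasB.isEmpty then
      (if cartasA.isEmpty then "Bob" else "Alice")
    else
      let cartaA := (PySem.List.max? cartasA (fun x => x)).getD 0
      let posibles := cartasB.filter (fun c => decide (cartaA < c) || (c == 1 && cartaA == n))
      match PySem.List.min? posibles (fun x => x) with
      | some cartaB =>
          -- ganador = 'B'
          cgLoop n fuel ((PySem.List.remove? cartasA cartaA).getD cartasA)
                        (((PySem.List.remove? cartasB cartaB).getD cartasB) ++ [cartaA, cartaB])
      | none =>
          -- ganador = 'A'
          let cartaB := (PySem.List.min? cartasB (fun x => x)).getD 0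
          cgLoop n fuel (((PySem.List.remove? cartasA cartaA).getD cartasA) ++ [cartaA, cartaB])
                        ((PySem.List.remove? cartasB cartaB).getD cartasB)

def card_game (n : Int) (distribucion : String) : String :=
  let cartasA := cgA distribucion
  let cartasB := cgB distribucion
  cgLoop n (cartasA.length + cartasB.length) cartasA cartasB

-- ===== PORT B =====
def cgAltStep (st : Option Int × Option Int × Bool) (p : Int × Char) : Option Int × Option Int × Bool :=
  let card := p.1 + 1
  if p.2 == 'A' then (some card, st.2.1, st.2.2)
  else if p.2 == 'B' then (st.1, some card, st.2.2 || (card == 1))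
  else st

def card_game_alt (n : Int) (distribucion : String) : String :=
  let st := (PySem.List.enumerate distribucion.toList 0).foldl cgAltStep (none, none, false)
  match st with
  | (none, _, _) => "Bob"
  | (some _, none, _) => "Alice"
  | (some ma, some mb, b1) => if decide (ma < mb) || (b1 && decide (ma = n)) then "Bob" else "Alice"

-- ===== PRECONDITION & SPEC =====
def Spec_card_game (n : Int) (distribucion : String) (out : String) : Prop := out = card_game_alt n distribucion
instance (n : Int) (distribucion : String) (out : String) : Decidable (Spec_card_game n distribucion out) := by unfold Spec_card_game; infer_instance

-- ===== CLAIM (what is proved, stated in full; the proofs are below) =====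
def Claim_equal_card_game : Prop := ∀ (n : Int) (distribucion : String), Dom_card_game n distribucion → Spec_card_game n distribucion (card_game n distribucion)

-- ===== LEMMAS AND PROOFS =====

theorem cgLoop_nil_left (n : Int) (fuel : Nat) (B : List Int) : cgLoop n fuel [] B = "Bob" := by
  cases fuel <;> simp [cgLoop]

theorem cgLoop_nil_right (n : Int) (fuel : Nat) (A : List Int) (h : A ≠ []) :
    cgLoop n fuel A [] = "Alice" := by
  cases fuel <;> simp [cgLoop, h]

theorem max_val (A : List Int) (mA : Int) (hm : mA ∈ A) (hle : ∀ a ∈ A, a ≤ mA) :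
    PySem.List.max? A (fun x => x) = some mA := by
  cases hmax : PySem.List.max? A (fun x => x) with
  | none =>
      rw [PySem.List.max?_eq_none_iff] at hmax
      subst hmax; cases hm
  | some m =>
      have h1 : m ∈ A := PySem.List.max?_mem hmax
      have h2 : mA ≤ m := PySem.List.max?_isMax hmax mA hm
      have h3 : m ≤ mA := hle m h1
      have : m = mA := le_antisymm h3 h2
      rw [this]

theorem min_val_mem (B : List Int) (h : B ≠ []) :
    ∃ mB, PySem.List.min? B (fun x => x) = some mB ∧ mB ∈ B := by
  cases hmin : PySem.List.min? B (fun x => x) with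
  | none => rw [PySem.List.min?_eq_none_iff] at hmin; exact absurd hmin h
  | some m => exact ⟨m, rfl, PySem.List.min?_mem hmin⟩

theorem cgLoop_alice (n : Int) : ∀ (fuel : Nat) (A B : List Int) (mA : Int),
    mA ∈ A → (∀ a ∈ A, a ≤ mA) →
    (∀ b ∈ B, ¬(mA < b) ∧ ¬(b = 1 ∧ mA = n)) →
    B.length ≤ fuel → cgLoop n fuel A B = "Alice" := by
  intro fuel
  induction fuel with
  | zero =>
      intro A B mA hm _ _ hlen
      have hA : A ≠ [] := fun h => by subst h; cases hm
      simp [cgLoop, hA]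
  | succ f ih =>
      intro A B mA hm hle hbad hlen
      have hA : A ≠ [] := fun h => by subst h; cases hm
      by_cases hB : B = []
      · subst hB; exact cgLoop_nil_right n (f+1) A hA
      · have hmax : (PySem.List.max? A (fun x => x)).getD 0 = mA := by
          rw [max_val A mA hm hle]; rfl
        have hfilter : B.filter (fun c => decide (mA < c) || (c == 1 && mA == n)) = [] := by
          apply List.filter_eq_nil_iff.mpr
          intro c hc
          obtain ⟨h1, h2⟩ := hbad c hc
          simp only [Bool.or_eq_true, decide_eq_true_eq, Bool.and_eq_true, beq_iff_eq] at *
          tauto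
        obtain ⟨mB, hminB, hmBmem⟩ := min_val_mem B hB
        have hremA : (PySem.List.remove? A mA).getD A = A.erase mA := by
          rw [PySem.List.remove?_eq_some_erase A mA hm]; rfl
        have hremB : (PySem.List.remove? B mB).getD B = B.erase mB := by
          rw [PySem.List.remove?_eq_some_erase B mB hmBmem]; rfl
        have hAe : A.isEmpty = false := by simpa using hA
        have hBe : B.isEmpty = false := by simpa using hB
        have hnone : PySem.List.min? (B.filter (fun c => decide (mA < c) || (c == 1 && mA == n))) (fun x => x) = none := by
          rw [hfilter]; exact (PySem.List.min?_eq_none_iff _ _).mpr rfl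
        rw [cgLoop]
        simp only [hAe, hBe, Bool.or_self, hmax,
          hnone, hminB, Option.getD_some, hremA, hremB]
        apply ih (A.erase mA ++ [mA, mB]) (B.erase mB) mA
        · exact List.mem_append_right _ (by simp)
        · intro a ha
          rcases List.mem_append.mp ha with h | h
          · exact hle a (List.mem_of_mem_erase h)
          · have hmBle : mB ≤ mA := le_of_not_gt (hbad mB hmBmem).1
            rcases List.mem_cons.mp h with rfl | h
            · exact le_refl _
            · simp at h; subst h; exact hmBle
        · intro b hb; exact hbad b (List.mem_of_mem_erase hb)
        · have h1 : (B.erase mB).length = B.length - 1 := List.length_erase_of_mem hmBmem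
          have h2 : 0 < B.length := List.length_pos_iff.mpr hB
          omega

theorem cgLoop_bob (n : Int) : ∀ (fuel : Nat) (A B : List Int) (mA : Int),
    A.Nodup → mA ∈ A → (∀ a ∈ A, a ≤ mA) →
    (∃ b ∈ B, mA < b ∨ (b = 1 ∧ mA = n)) →
    A.length ≤ fuel → cgLoop n fuel A B = "Bob" := by
  intro fuel
  induction fuel with
  | zero =>
      intro A B mA _ hm _ _ hlen
      have hA : A = [] := List.eq_nil_of_length_eq_zero (Nat.le_zero.mp hlen)
      subst hA; cases hm
  | succ f ih =>
      intro A B mA hnd hm hle hwin hlen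
      obtain ⟨b, hbB, hbw⟩ := hwin
      have hA : A ≠ [] := fun h => by subst h; cases hm
      have hB : B ≠ [] := fun h => by subst h; cases hbB
      have hmax : (PySem.List.max? A (fun x => x)).getD 0 = mA := by
        rw [max_val A mA hm hle]; rfl
      have hbpred : (fun c => decide (mA < c) || (c == 1 && mA == n)) b = true := by
        simp only [Bool.or_eq_true, decide_eq_true_eq, Bool.and_eq_true, beq_iff_eq]
        tauto
      have hfne : B.filter (fun c => decide (mA < c) || (c == 1 && mA == n)) ≠ [] := by
        intro h
        have hmem : b ∈ B.filter (fun c => decide (mA < c) || (c == 1 && mA == n)) :=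
          List.mem_filter.mpr ⟨hbB, hbpred⟩
        rw [h] at hmem; cases hmem
      obtain ⟨mB, hminP, hmBmem⟩ := min_val_mem _ hfne
      obtain ⟨hmBB, _⟩ := List.mem_filter.mp hmBmem
      have hremA : (PySem.List.remove? A mA).getD A = A.erase mA := by
        rw [PySem.List.remove?_eq_some_erase A mA hm]; rfl
      have hremB : (PySem.List.remove? B mB).getD B = B.erase mB := by
        rw [PySem.List.remove?_eq_some_erase B mB hmBB]; rfl
      have hAe : A.isEmpty = false := by simpa using hA
      have hBe : B.isEmpty = false := by simpa using hB
      rw [cgLoop]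
      simp only [hAe, hBe, Bool.or_self, hmax,
        hminP, hremA, hremB]
      by_cases hA' : A.erase mA = []
      · rw [hA']; exact cgLoop_nil_left n f _
      · cases hmax' : PySem.List.max? (A.erase mA) (fun x => x) with
        | none => exact absurd ((PySem.List.max?_eq_none_iff _ _).mp hmax') hA'
        | some m' =>
          have hm'mem : m' ∈ A.erase mA := PySem.List.max?_mem hmax'
          have hm'le : ∀ a ∈ A.erase mA, a ≤ m' := fun a ha => PySem.List.max?_isMax hmax' a ha
          have hm'A : m' ∈ A := List.mem_of_mem_erase hm'mem
          have hm'ne : m' ≠ mA := ((List.Nodup.mem_erase_iff hnd).mp hm'mem).1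
          have hm'lt : m' < mA := lt_of_le_of_ne (hle m' hm'A) hm'ne
          apply ih (A.erase mA) (B.erase mB ++ [mA, mB]) m' (hnd.erase mA) hm'mem hm'le
          · exact ⟨mA, List.mem_append_right _ (by simp), Or.inl hm'lt⟩
          · have h1 : (A.erase mA).length = A.length - 1 := List.length_erase_of_mem hm
            have h2 : 0 < A.length := List.length_pos_iff.mpr hA
            omega

def cardsOf (ch : Char) (l : List (Int × Char)) : List Int :=
  (l.filter (fun p => p.2 == ch)).map (fun p => p.1 + 1)

theorem lastOr_cons (x : Int) (xs : List Int) (y : Option Int) :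
    ((x :: xs).getLast?).or y = (xs.getLast?).or (some x) := by
  induction xs generalizing x y with
  | nil => simp
  | cons z zs ih => rw [List.getLast?_cons_cons, ih z y, ih z (some x)]

theorem fold_char : ∀ (l : List (Int × Char)) (st : Option Int × Option Int × Bool),
    l.foldl cgAltStep st =
      (((cardsOf 'A' l).getLast?).or st.1, ((cardsOf 'B' l).getLast?).or st.2.1,
       st.2.2 || (cardsOf 'B' l).contains 1) := by
  intro l
  induction l with
  | nil => intro st; simp [cardsOf]
  | cons p l ih =>
      intro st
      obtain ⟨i, c⟩ := p
      by_cases hA : c = 'A'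
      · subst hA
        rw [List.foldl_cons, ih]
        simp [cgAltStep, cardsOf, lastOr_cons]
      · by_cases hB : c = 'B'
        · subst hB
          rw [List.foldl_cons, ih]
          simp [cgAltStep, cardsOf, lastOr_cons, Bool.or_assoc]
          rcases eq_or_ne i 0 with hi | hi
          · subst hi; simp
          · have h1 : ((i + 1 : Int) == 1) = false := by simp; omega
            simp [hi, h1]
        · rw [List.foldl_cons, ih]
          simp [cgAltStep, cardsOf, hA, hB]

theorem cards_pairwise (ch : Char) (s : String) :
    (cardsOf ch (PySem.List.enumerate s.toList 0)).Pairwise (· < ·) := by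
  unfold cardsOf
  exact List.Pairwise.map _ (fun a b h => by omega)
    ((PySem.List.pairwise_lt_enumerate _ _).filter _)

theorem last_max : ∀ (L : List Int), L.Pairwise (· < ·) → ∀ (x : Int), L.getLast? = some x →
    x ∈ L ∧ ∀ a ∈ L, a ≤ x := by
  intro L
  induction L with
  | nil => intro _ x hx; cases hx
  | cons y ys ih =>
      intro hp x hx
      cases ys with
      | nil =>
          simp at hx; subst hx; simp
      | cons z zs =>
          rw [List.getLast?_cons_cons] at hx
          obtain ⟨hx1, hx2⟩ := ih (List.pairwise_cons.mp hp).2 x hx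
          refine ⟨List.mem_cons_of_mem _ hx1, ?_⟩
          intro a ha
          rcases List.mem_cons.mp ha with rfl | h
          · exact le_of_lt ((List.pairwise_cons.mp hp).1 x hx1)
          · exact hx2 a h

theorem card_game_spec : Claim_equal_card_game := by
  unfold Claim_equal_card_game
  intro n s _
  unfold Spec_card_game card_game card_game_alt
  rw [fold_char (PySem.List.enumerate s.toList 0) (none, none, false)]
  simp only [Option.or_none, Bool.false_or]
  have hAeq : cgA s = cardsOf 'A' (PySem.List.enumerate s.toList 0) := rfl
  have hBeq : cgB s = cardsOf 'B' (PySem.List.enumerate s.toList 0) := rfl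
  set A0 := cardsOf 'A' (PySem.List.enumerate s.toList 0) with hA0def
  set B0 := cardsOf 'B' (PySem.List.enumerate s.toList 0) with hB0def
  rw [hAeq, hBeq]
  have hpwA : A0.Pairwise (· < ·) := cards_pairwise 'A' s
  have hpwB : B0.Pairwise (· < ·) := cards_pairwise 'B' s
  cases hL : A0.getLast? with
  | none =>
      have : A0 = [] := List.getLast?_eq_none_iff.mp hL
      rw [this]
      exact cgLoop_nil_left n _ B0
  | some mA =>
      have hA0ne : A0 ≠ [] := by intro h; rw [h] at hL; cases hL
      obtain ⟨hmemA, hleA⟩ := last_max A0 hpwA mA hL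
      cases hL2 : B0.getLast? with
      | none =>
          have : B0 = [] := List.getLast?_eq_none_iff.mp hL2
          rw [this]
          exact cgLoop_nil_right n _ A0 hA0ne
      | some mB =>
          obtain ⟨hmemB, hleB⟩ := last_max B0 hpwB mB hL2
          by_cases hw : mA < mB ∨ (1 ∈ B0 ∧ mA = n)
          · have hcond : (decide (mA < mB) || (B0.contains 1 && decide (mA = n))) = true := by
              simp only [Bool.or_eq_true, decide_eq_true_eq, Bool.and_eq_true, List.contains_iff_mem]
              tauto
            simp only [hcond, if_true]
            apply cgLoop_bob n _ A0 B0 mA (hpwA.imp (fun h => ne_of_lt h)) hmemA hleA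
            · rcases hw with h | ⟨h1, h2⟩
              · exact ⟨mB, hmemB, Or.inl h⟩
              · exact ⟨1, h1, Or.inr ⟨rfl, h2⟩⟩
            · exact Nat.le_add_right _ _
          · rw [not_or] at hw
            have hcond : (decide (mA < mB) || (B0.contains 1 && decide (mA = n))) = false := by
              simp only [Bool.or_eq_false_iff, decide_eq_false_iff_not, Bool.and_eq_false_iff]
              constructor
              · exact hw.1
              · by_cases h1 : (1 : Int) ∈ B0
                · right; simpa using fun hn => hw.2 ⟨h1, hn⟩
                · left; simpa using h1
            simp only [hcond]
            apply cgLoop_alice n _ A0 B0 mA hmemA hleA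
            · intro b hb
              refine ⟨fun hlt => hw.1 (lt_of_lt_of_le hlt (hleB b hb)), ?_⟩
              rintro ⟨rfl, hn⟩
              exact hw.2 ⟨hb, hn⟩
            · exact Nat.le_add_left _ _
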